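-- pv_equiv track=rewrite | github.com/tbarbito/atudic-supreme | app/services/agent_composer.py | _text_error_analysis
-- ===== SOURCE A (Python) =====
-- def _text_error_analysis(entities, sections, context):
--     parts = []
--     codes = entities.get("error_codes", [])
--     if codes:
--         parts.append(f"Analisando o(s) erro(s): **{', '.join(codes)}**")
--
--     articles = [s for s in sections if s["type"] == "article"]
--     if articles:
--         parts.append("\n**Artigos relevantes encontrados na Base de Conhecimento:**")
--         for a in articles:
--             parts.append(f"- **{a['title']}**: {a['content'][:200]}")
--
--     memory = [s for s in sections if s["type"] == "memory"]
--     if memory: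
--         parts.append("\n**Da memória do agente:**")
--         for m in memory[:2]:
--             parts.append(f"- **{m['title']}** ({m['source_file']})")
--
--     alerts = [s for s in sections if s["type"] == "alert"]
--     if alerts:
--         parts.append(f"\n**{len(alerts)} alerta(s) recente(s) no ambiente.**")
--
--     if not parts:
--         parts.append(
--             "Não encontrei informações específicas sobre esse erro na base de dados. "
--             "Tente verificar o console.log do AppServer para mais detalhes."
--         )
--
--     return "\n".join(parts)
-- ===== SOURCE B (Python) =====
-- def _text_error_analysis(entities, sections, context):
--     # One fused pass over sections: format output lines on the fly and count alerts;
--     # no per-type section lists are ever materialised.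
--     article_lines = []
--     memory_lines = []
--     have_memory = False
--     alert_count = 0
--     for s in sections:
--         t = s["type"]
--         if t == "article":
--             article_lines.append(f"- **{s['title']}**: {s['content'][:200]}")
--         elif t == "memory":
--             have_memory = True
--             if len(memory_lines) < 2:
--                 memory_lines.append(f"- **{s['title']}** ({s['source_file']})")
--         elif t == "alert":
--             alert_count += 1
--
--     parts = []
--     codes = entities.get("error_codes", [])
--     if codes:
--         parts.append(f"Analisando o(s) erro(s): **{', '.join(codes)}**")
--     if article_lines:
--         parts.append("\n**Artigos relevantes encontrados na Base de Conhecimento:**")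
--         parts.extend(article_lines)
--     if have_memory:
--         parts.append("\n**Da memória do agente:**")
--         parts.extend(memory_lines)
--     if alert_count:
--         parts.append(f"\n**{alert_count} alerta(s) recente(s) no ambiente.**")
--     if not parts:
--         parts.append(
--             "Não encontrei informações específicas sobre esse erro na base de dados. "
--             "Tente verificar o console.log do AppServer para mais detalhes."
--         )
--     return "\n".join(parts)
-- ===== Notes on version B (the rewrite author's own statement) =====
-- stated objective: alternative
-- what changed: B replaces A's three separate filter passes and collected section lists by a single fused pass over sections that formats article/memory output lines on the fly (memory capped at 2 online) and only counts alerts, then assembles the parts from those accumulators.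
import Mathlib
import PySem

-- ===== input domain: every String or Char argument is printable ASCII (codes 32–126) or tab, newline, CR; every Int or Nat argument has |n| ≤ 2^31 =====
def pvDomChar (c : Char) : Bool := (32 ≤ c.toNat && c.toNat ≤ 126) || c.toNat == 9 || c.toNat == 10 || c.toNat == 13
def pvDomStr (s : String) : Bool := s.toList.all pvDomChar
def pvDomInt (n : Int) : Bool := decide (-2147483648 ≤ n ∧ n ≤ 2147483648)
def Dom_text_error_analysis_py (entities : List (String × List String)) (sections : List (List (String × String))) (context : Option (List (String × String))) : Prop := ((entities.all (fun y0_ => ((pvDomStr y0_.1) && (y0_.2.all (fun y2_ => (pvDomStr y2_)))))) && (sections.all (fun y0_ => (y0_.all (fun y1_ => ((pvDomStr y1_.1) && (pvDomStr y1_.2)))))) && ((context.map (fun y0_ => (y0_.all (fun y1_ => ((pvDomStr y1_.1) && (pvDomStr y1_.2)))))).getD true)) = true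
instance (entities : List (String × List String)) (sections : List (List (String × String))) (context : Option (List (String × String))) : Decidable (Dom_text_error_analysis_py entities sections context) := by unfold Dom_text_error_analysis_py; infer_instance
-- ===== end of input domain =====

-- B replaces A's three filter passes by one fused pass over sections that formats article/memory lines on the fly and counts alerts; same output.

-- s[k]: first-match assoc-list lookup; Pre_ guarantees the key is present wherever the Python reads it,
-- so the "" default is never consulted on admitted inputs.
def secGet (s : List (String × String)) (k : String) : String :=
  ((PySem.Dict.mk s).get? k).getD ""

-- ===== PORT A =====
def text_error_analysis_py (entities : List (String × List String)) (sections : List (List (String × String))) (context : Option (List (String × String))) : String :=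
  let parts : List String := []
  let codes : List String := ((PySem.Dict.mk entities).get? "error_codes").getD []
  let parts := if codes = [] then parts else
    parts ++ ["Analisando o(s) erro(s): **" ++ PySem.Str.join ", " codes ++ "**"]
  let articles := sections.filter (fun s => secGet s "type" == "article")
  let parts := if articles = [] then parts else
    articles.foldl
      (fun ps a => ps ++ ["- **" ++ secGet a "title" ++ "**: " ++ PySem.Str.slice (secGet a "content") none (some 200)])
      (parts ++ ["\n**Artigos relevantes encontrados na Base de Conhecimento:**"])
  let memory := sections.filter (fun s => secGet s "type" == "memory")
  let parts := if memory = [] then parts else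
    (PySem.List.slice memory none (some 2)).foldl
      (fun ps m => ps ++ ["- **" ++ secGet m "title" ++ "** (" ++ secGet m "source_file" ++ ")"])
      (parts ++ ["\n**Da memória do agente:**"])
  let alerts := sections.filter (fun s => secGet s "type" == "alert")
  let parts := if alerts = [] then parts else
    parts ++ ["\n**" ++ PySem.Int.toStr (alerts.length : Int) ++ " alerta(s) recente(s) no ambiente.**"]
  let parts := if parts = [] then
    ["Não encontrei informações específicas sobre esse erro na base de dados. Tente verificar o console.log do AppServer para mais detalhes."]
    else parts
  PySem.Str.join "\n" parts

-- ===== PORT B =====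
-- state of B's fused loop: (article_lines, memory_lines, have_memory, alert_count)
def fuseStep (st : List String × List String × Bool × Int) (s : List (String × String)) :
    List String × List String × Bool × Int :=
  let t := secGet s "type"
  if t == "article" then
    (st.1 ++ ["- **" ++ secGet s "title" ++ "**: " ++ PySem.Str.slice (secGet s "content") none (some 200)],
     st.2.1, st.2.2.1, st.2.2.2)
  else if t == "memory" then
    (st.1,
     if st.2.1.length < 2 then
       st.2.1 ++ ["- **" ++ secGet s "title" ++ "** (" ++ secGet s "source_file" ++ ")"]
     else st.2.1,
     true, st.2.2.2)
  else if t == "alert" then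
    (st.1, st.2.1, st.2.2.1, st.2.2.2 + 1)
  else st

def text_error_analysis_py_alt (entities : List (String × List String)) (sections : List (List (String × String))) (context : Option (List (String × String))) : String :=
  let st := sections.foldl fuseStep ([], [], false, 0)
  let articleLines := st.1
  let memoryLines := st.2.1
  let haveMemory := st.2.2.1
  let alertCount := st.2.2.2
  let parts : List String := []
  let codes : List String := ((PySem.Dict.mk entities).get? "error_codes").getD []
  let parts := if codes = [] then parts else
    parts ++ ["Analisando o(s) erro(s): **" ++ PySem.Str.join ", " codes ++ "**"]
  let parts := if articleLines = [] then parts else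
    parts ++ ["\n**Artigos relevantes encontrados na Base de Conhecimento:**"] ++ articleLines
  let parts := if haveMemory then
    parts ++ ["\n**Da memória do agente:**"] ++ memoryLines
    else parts
  let parts := if alertCount = 0 then parts else
    parts ++ ["\n**" ++ PySem.Int.toStr alertCount ++ " alerta(s) recente(s) no ambiente.**"]
  let parts := if parts = [] then
    ["Não encontrei informações específicas sobre esse erro na base de dados. Tente verificar o console.log do AppServer para mais detalhes."]
    else parts
  PySem.Str.join "\n" parts

-- ===== PRECONDITION & SPEC =====
-- Pre_ excludes exactly the inputs on which the Python raises KeyError: a section without a "type" key,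
-- an article section without "title"/"content", or one of the first two memory sections without "title"/"source_file".
def Pre_text_error_analysis_py (entities : List (String × List String)) (sections : List (List (String × String))) (context : Option (List (String × String))) : Prop :=
  (sections.all (fun s =>
      (PySem.Dict.mk s).contains "type" &&
      (secGet s "type" == "article" → ((PySem.Dict.mk s).contains "title" && (PySem.Dict.mk s).contains "content"))) &&
   ((sections.filter (fun s => secGet s "type" == "memory")).take 2).all (fun s =>
      (PySem.Dict.mk s).contains "title" && (PySem.Dict.mk s).contains "source_file")) = true
instance (entities : List (String × List String)) (sections : List (List (String × String))) (context : Option (List (String × String))) : Decidable (Pre_text_error_analysis_py entities sections context) := by unfold Pre_text_error_analysis_py; infer_instance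

def pvWitness_text_error_analysis_py : (List (String × List String)) × (List (List (String × String))) × (Option (List (String × String))) :=
  ([("error_codes", ["E1", "E2"])],
   [[("type", "alert")], [("type", "article"), ("title", "T"), ("content", "C")], [("type", "memory"), ("title", "M"), ("source_file", "f.py")]],
   none)

def Spec_text_error_analysis_py (entities : List (String × List String)) (sections : List (List (String × String))) (context : Option (List (String × String))) (out : String) : Prop := out = text_error_analysis_py_alt entities sections context
instance (entities : List (String × List String)) (sections : List (List (String × String))) (context : Option (List (String × String))) (out : String) : Decidable (Spec_text_error_analysis_py entities sections context out) := by unfold Spec_text_error_analysis_py; infer_instance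

-- ===== CLAIM (what is proved, stated in full; the proofs are below) =====
def Claim_equal_text_error_analysis_py : Prop := ∀ (entities : List (String × List String)) (sections : List (List (String × String))) (context : Option (List (String × String))), Dom_text_error_analysis_py entities sections context → Pre_text_error_analysis_py entities sections context → Spec_text_error_analysis_py entities sections context (text_error_analysis_py entities sections context)

-- ===== LEMMAS AND PROOFS =====

-- B's fused loop, characterised: from an arbitrary state it appends the mapped article filter,
-- the mapped (budget-limited) memory filter, or-s in memory non-emptiness, and adds the alert count.
theorem fuse_char (l : List (List (String × String))) (a m : List String) (hm : Bool) (c : Int) :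
    l.foldl fuseStep (a, m, hm, c) =
      (a ++ (l.filter (fun s => secGet s "type" == "article")).map
          (fun s => "- **" ++ secGet s "title" ++ "**: " ++ PySem.Str.slice (secGet s "content") none (some 200)),
       m ++ (((l.filter (fun s => secGet s "type" == "memory")).map
          (fun s => "- **" ++ secGet s "title" ++ "** (" ++ secGet s "source_file" ++ ")")).take (2 - m.length)),
       hm || !(l.filter (fun s => secGet s "type" == "memory")).isEmpty,
       c + ((l.filter (fun s => secGet s "type" == "alert")).length : Int)) := by
  induction l generalizing a m hm c with
  | nil => simp
  | cons s l ih =>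
    simp only [List.foldl_cons, List.filter_cons]
    by_cases ha : secGet s "type" = "article"
    · have step : fuseStep (a, m, hm, c) s =
        (a ++ ["- **" ++ secGet s "title" ++ "**: " ++ PySem.Str.slice (secGet s "content") none (some 200)], m, hm, c) := by
        simp [fuseStep, ha]
      rw [step, ih]
      simp [ha, List.append_assoc]
    · by_cases hmm : secGet s "type" = "memory"
      · by_cases hlen : m.length < 2
        · have step : fuseStep (a, m, hm, c) s =
            (a, m ++ ["- **" ++ secGet s "title" ++ "** (" ++ secGet s "source_file" ++ ")"], true, c) := by
            simp [fuseStep, hmm, hlen]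
          rw [step, ih]
          have h3 : 2 - m.length = (2 - (m ++ ["- **" ++ secGet s "title" ++ "** (" ++ secGet s "source_file" ++ ")"]).length) + 1 := by
            simp; omega
          
          simp [h3, List.take_succ_cons, List.append_assoc, hmm]
        · have step : fuseStep (a, m, hm, c) s = (a, m, true, c) := by
            simp [fuseStep, hmm, hlen]
          rw [step, ih]
          have h0 : 2 - m.length = 0 := by omega
          simp [h0, hmm]
      · by_cases hal : secGet s "type" = "alert"
        · have step : fuseStep (a, m, hm, c) s = (a, m, hm, c + 1) := by
            simp [fuseStep, hal]
          rw [step, ih]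
          simp [hal]
          ring_nf
        · have step : fuseStep (a, m, hm, c) s = (a, m, hm, c) := by
            simp [fuseStep, ha, hmm, hal]
          rw [step, ih]
          simp [ha, hmm, hal]

theorem slice_two_eq_take {α : Type} (l : List α) :
    PySem.List.slice l none (some 2) = l.take 2 := by
  have := PySem.List.slice_to_natCast l 2
  simpa using this

theorem text_error_analysis_py_spec : Claim_equal_text_error_analysis_py := by
  intro entities sections context _ _
  unfold Spec_text_error_analysis_py text_error_analysis_py text_error_analysis_py_alt
  simp only [fuse_char, List.nil_append, List.length_nil, Nat.sub_zero, Bool.false_or,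
    Int.zero_add, slice_two_eq_take,
    PySem.List.foldl_append_singleton_eq_map, List.append_assoc, List.map_take]
  set codes := ((PySem.Dict.mk entities).get? "error_codes").getD ([] : List String) with hc
  set articles := sections.filter (fun s => secGet s "type" == "article") with hart
  set memory := sections.filter (fun s => secGet s "type" == "memory") with hmem
  set alerts := sections.filter (fun s => secGet s "type" == "alert") with hal
  by_cases h1 : codes = [] <;>
  by_cases h2 : articles = [] <;>
  by_cases h3 : memory = [] <;>
  by_cases h4 : alerts = [] <;>
  simp [h1, h2, h3, h4]

-- ===== VERDICT (by name) is the single theorem above =====
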